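-- pv_equiv track=rewrite | github.com/wakameds/UQDS | MATH7232_Operations Res./Assignment3.submit.py | CheckNeighbour
-- ===== SOURCE A (Python) =====
-- Adjacent = {
--         0:[1,3],
--         1:[0,4],
--         2:[6],
--         3:[0,1,4],
--         4:[1,3,5,7],
--         5:[4,6],
--         6:[2,5,8],
--         7:[4],
--         8:[6],
--         }
--
-- Sites = range(9)
--
-- def CheckNeighbour(s):
--     #confirm site[i] is lost
--     LostCount =[0,0,0,0,0,0,0,0,0]
--     for i in Sites:
--         if s[i] == -1:
--             for j in range(len(Adjacent[i])):
--                 if s[Adjacent[i][j]] ==  0: #adjacent site j is fragile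
--                     LostCount[Adjacent[i][j]] = LostCount[Adjacent[i][j]] + 1
--     return LostCount
-- ===== SOURCE B (Python) =====
-- Adjacent = {
--         0:[1,3],
--         1:[0,4],
--         2:[6],
--         3:[0,1,4],
--         4:[1,3,5,7],
--         5:[4,6],
--         6:[2,5,8],
--         7:[4],
--         8:[6],
--         }
--
-- # Reverse-adjacency index: Reverse[j] = sites i with an edge i -> j.
-- Reverse = {j: [i for i in range(9) if j in Adjacent[i]] for j in range(9)}
--
-- def CheckNeighbour(s):
--     return [sum(1 for i in Reverse[j] if s[i] == -1) if s[j] == 0 else 0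
--             for j in range(9)]
-- ===== Notes on version B (the rewrite author's own statement) =====
-- stated objective: alternative
-- what changed: Replaces the forward accumulate-into-neighbours double loop with a precomputed reverse-adjacency table and a single per-cell counting comprehension.
import Mathlib
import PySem

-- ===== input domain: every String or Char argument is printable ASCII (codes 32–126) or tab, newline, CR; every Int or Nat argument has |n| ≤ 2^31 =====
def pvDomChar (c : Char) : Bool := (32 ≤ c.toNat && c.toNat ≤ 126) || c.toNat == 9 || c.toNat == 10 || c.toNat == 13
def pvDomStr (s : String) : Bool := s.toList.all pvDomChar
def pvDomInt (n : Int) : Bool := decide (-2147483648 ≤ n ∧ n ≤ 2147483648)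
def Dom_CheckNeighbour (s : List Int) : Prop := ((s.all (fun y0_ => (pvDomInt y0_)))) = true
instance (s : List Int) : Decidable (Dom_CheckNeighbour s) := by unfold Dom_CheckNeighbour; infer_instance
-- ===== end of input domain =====

-- B replaces A's forward accumulate-into-neighbours double loop by a precomputed
-- reverse-adjacency table and one per-cell counting pass (objective: alternative).

-- ===== PORT A =====
-- Adjacent[i]; keys 0..8 (only ever looked up at i in range(9))
def pyAdjacent (i : Int) : List Int :=
  if i = 0 then [1, 3]
  else if i = 1 then [0, 4]
  else if i = 2 then [6]
  else if i = 3 then [0, 1, 4]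
  else if i = 4 then [1, 3, 5, 7]
  else if i = 5 then [4, 6]
  else if i = 6 then [2, 5, 8]
  else if i = 7 then [4]
  else [6]   -- i = 8 (never looked up elsewhere)

-- the body of A's outer loop (one site i); Adjacent[i][j] is written out each time, as in A
def pvOuterStep (s : List Int) (lc : List Int) (i : Int) : List Int :=
  if PySem.List.pyGetD s i 0 = -1 then
    (PySem.List.pyRange 0 ((pyAdjacent i).length : Int) 1).foldl (fun lc2 j =>
      if PySem.List.pyGetD s (PySem.List.pyGetD (pyAdjacent i) j 0) 0 = 0 then
        PySem.List.pySetD lc2 (PySem.List.pyGetD (pyAdjacent i) j 0)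
          (PySem.List.pyGetD lc2 (PySem.List.pyGetD (pyAdjacent i) j 0) 0 + 1)
      else lc2) lc
  else lc

-- s[...] is IndexError for lists shorter than 9: excluded by Pre_; pyGetD is exact there
def CheckNeighbour (s : List Int) : List Int :=
  (PySem.List.pyRange 0 9 1).foldl (pvOuterStep s) [0, 0, 0, 0, 0, 0, 0, 0, 0]

-- ===== PORT B =====
-- Reverse[j] = [i for i in range(9) if j in Adjacent[i]]
def pyReverse (j : Int) : List Int :=
  (PySem.List.pyRange 0 9 1).filter (fun i => (pyAdjacent i).contains j)

def CheckNeighbour_alt (s : List Int) : List Int :=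
  (PySem.List.pyRange 0 9 1).map (fun j =>
    if PySem.List.pyGetD s j 0 = 0 then
      ((pyReverse j).countP (fun i => PySem.List.pyGetD s i 0 = -1) : Int)
    else 0)

-- ===== PRECONDITION & SPEC =====
-- Pre_ excludes exactly the lists shorter than 9, on which Python's s[i] raises IndexError.
def Pre_CheckNeighbour (s : List Int) : Prop := 9 ≤ s.length
instance (s : List Int) : Decidable (Pre_CheckNeighbour s) := by unfold Pre_CheckNeighbour; infer_instance
def pvWitness_CheckNeighbour : List Int := [-1, 0, 0, -1, 0, 1, 0, 0, 0]

def Spec_CheckNeighbour (s : List Int) (out : List Int) : Prop := out = CheckNeighbour_alt s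
instance (s : List Int) (out : List Int) : Decidable (Spec_CheckNeighbour s out) := by unfold Spec_CheckNeighbour; infer_instance

-- ===== CLAIM (what is proved, stated in full; the proofs are below) =====
def Claim_equal_CheckNeighbour : Prop := ∀ (s : List Int), Dom_CheckNeighbour s → Pre_CheckNeighbour s → Spec_CheckNeighbour s (CheckNeighbour s)

-- ===== LEMMAS AND PROOFS =====

theorem getD_set (l : List Int) (m : Nat) (v : Int) (n : Nat) (d : Int) :
    (l.set m v).getD n d = if n = m ∧ m < l.length then v else l.getD n d := by
  rcases Nat.lt_or_ge m l.length with h | h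
  · by_cases hn : n = m
    · subst hn; simp [List.getD_eq_getElem?_getD, h]
    · simp [List.getD_eq_getElem?_getD, List.getElem?_set, hn,
        if_neg (fun hmn => hn hmn.symm : ¬ m = n)]
  · simp [List.set_eq_of_length_le (by omega)]
    omega

-- invariant of A's inner loop: cell n grows by the number of occurrences of n
-- in the adjacency list, provided site n is fragile
theorem inner_spec (s : List Int) (a : List Int)
    (ha : ∀ x ∈ a, ∃ m : Nat, m < 9 ∧ x = (m : Int)) (lc : List Int) (hlen : lc.length = 9) :
    (a.foldl (fun lc2 k =>
        if PySem.List.pyGetD s k 0 = 0 then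
          PySem.List.pySetD lc2 k (PySem.List.pyGetD lc2 k 0 + 1) else lc2) lc).length = 9
    ∧ ∀ n : Nat, n < 9 →
      (a.foldl (fun lc2 k =>
          if PySem.List.pyGetD s k 0 = 0 then
            PySem.List.pySetD lc2 k (PySem.List.pyGetD lc2 k 0 + 1) else lc2) lc).getD n 0
        = lc.getD n 0 + if s.getD n 0 = 0 then (a.count (n : Int) : Int) else 0 := by
  induction a generalizing lc with
  | nil => exact ⟨hlen, fun n _ => by simp⟩
  | cons x rest ih =>
    obtain ⟨m, hm, rfl⟩ := ha _ (List.mem_cons_self ..)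
    have ha' : ∀ y ∈ rest, ∃ m : Nat, m < 9 ∧ y = (m : Int) :=
      fun y hy => ha y (List.mem_cons_of_mem _ hy)
    simp only [List.foldl_cons, PySem.List.pyGetD_natCast, PySem.List.pySetD_natCast]
    by_cases hq : s.getD m 0 = 0
    · rw [if_pos hq]
      obtain ⟨ihl, ihg⟩ := ih ha' (lc.set m (lc.getD m 0 + 1)) (by simp [hlen])
      refine ⟨ihl, fun n hn => ?_⟩
      rw [ihg n hn, getD_set, hlen]
      simp only [List.count_cons, beq_iff_eq, Nat.cast_inj, Nat.cast_add, Nat.cast_ite,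
        Nat.cast_one, Nat.cast_zero]
      by_cases hnm : n = m
      · subst hnm
        rw [if_pos ⟨rfl, hn⟩, if_pos (rfl : n = n)]
        split_ifs <;> omega
      · rw [if_neg (by omega : ¬(n = m ∧ m < 9)), if_neg (fun h => hnm h.symm : ¬ m = n)]
        split_ifs <;> omega
    · rw [if_neg hq]
      obtain ⟨ihl, ihg⟩ := ih ha' lc hlen
      refine ⟨ihl, fun n hn => ?_⟩
      rw [ihg n hn]
      simp only [List.count_cons, beq_iff_eq, Nat.cast_inj, Nat.cast_add, Nat.cast_ite,
        Nat.cast_one, Nat.cast_zero]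
      by_cases hnm : n = m
      · subst hnm
        rw [if_pos (rfl : n = n), if_neg hq, if_neg hq]
      · rw [if_neg (fun h => hnm h.symm : ¬ m = n)]
        split_ifs <;> omega

-- one step of A's outer loop, per cell
theorem outerStep_spec (s : List Int) (i : Int)
    (ha : ∀ x ∈ pyAdjacent i, ∃ m : Nat, m < 9 ∧ x = (m : Int))
    (lc : List Int) (hlen : lc.length = 9) :
    (pvOuterStep s lc i).length = 9 ∧ ∀ n : Nat, n < 9 →
      (pvOuterStep s lc i).getD n 0 = lc.getD n 0 +
        if PySem.List.pyGetD s i 0 = -1 ∧ s.getD n 0 = 0 then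
          ((pyAdjacent i).count (n : Int) : Int) else 0 := by
  unfold pvOuterStep
  by_cases hp : PySem.List.pyGetD s i 0 = -1
  · have hb : (PySem.List.pyRange 0 ((pyAdjacent i).length : Int) 1).foldl (fun lc2 j =>
        if PySem.List.pyGetD s (PySem.List.pyGetD (pyAdjacent i) j 0) 0 = 0 then
          PySem.List.pySetD lc2 (PySem.List.pyGetD (pyAdjacent i) j 0)
            (PySem.List.pyGetD lc2 (PySem.List.pyGetD (pyAdjacent i) j 0) 0 + 1)
        else lc2) lc
        = (pyAdjacent i).foldl (fun lc2 k =>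
            if PySem.List.pyGetD s k 0 = 0 then
              PySem.List.pySetD lc2 k (PySem.List.pyGetD lc2 k 0 + 1) else lc2) lc :=
      PySem.List.foldl_pyRange_zero_pyGetD' (pyAdjacent i) 0
        (fun lc2 k => if PySem.List.pyGetD s k 0 = 0 then
          PySem.List.pySetD lc2 k (PySem.List.pyGetD lc2 k 0 + 1) else lc2) lc
    rw [if_pos hp, hb]
    obtain ⟨hl, hg⟩ := inner_spec s (pyAdjacent i) ha lc hlen
    refine ⟨hl, fun n hn => ?_⟩
    rw [hg n hn]
    by_cases hq : s.getD n 0 = 0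
    · rw [if_pos hq, if_pos ⟨hp, hq⟩]
    · rw [if_neg hq, if_neg (fun h => hq h.2)]
  · rw [if_neg hp]
    exact ⟨hlen, fun n hn => by rw [if_neg (fun h => hp h.1), add_zero]⟩

-- A's whole outer loop: cell n accumulates one summand per lost in-neighbour
theorem outer_fold_spec (s : List Int) (is : List Int)
    (his : ∀ i ∈ is, ∀ x ∈ pyAdjacent i, ∃ m : Nat, m < 9 ∧ x = (m : Int))
    (lc : List Int) (hlen : lc.length = 9) :
    (is.foldl (pvOuterStep s) lc).length = 9 ∧ ∀ n : Nat, n < 9 →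
      (is.foldl (pvOuterStep s) lc).getD n 0 = lc.getD n 0 +
        (is.map (fun i => if PySem.List.pyGetD s i 0 = -1 ∧ s.getD n 0 = 0 then
          ((pyAdjacent i).count (n : Int) : Int) else 0)).sum := by
  induction is generalizing lc with
  | nil => exact ⟨hlen, fun n _ => by simp⟩
  | cons i rest ih =>
    obtain ⟨hl, hg⟩ := outerStep_spec s i (his i (List.mem_cons_self ..)) lc hlen
    obtain ⟨ihl, ihg⟩ := ih (fun j hj => his j (List.mem_cons_of_mem _ hj)) (pvOuterStep s lc i) hl
    refine ⟨ihl, fun n hn => ?_⟩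
    rw [List.foldl_cons]
    rw [ihg n hn, hg n hn, List.map_cons, List.sum_cons]
    ring

theorem eq_of_nine (l1 l2 : List Int) (h1 : l1.length = 9) (h2 : l2.length = 9)
    (h : ∀ n : Nat, n < 9 → l1.getD n 0 = l2.getD n 0) : l1 = l2 := by
  apply List.ext_getElem (by omega)
  intro n hn _
  have := h n (by omega)
  rwa [List.getD_eq_getElem _ _ hn, List.getD_eq_getElem _ _ (by omega)] at this

theorem B_len (s : List Int) : (CheckNeighbour_alt s).length = 9 := by
  unfold CheckNeighbour_alt
  rw [show PySem.List.pyRange 0 9 1 = [0,1,2,3,4,5,6,7,8] from by decide]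
  simp

-- ===== VERDICT (by name: the statement is the Claim_ definition above) =====
set_option maxHeartbeats 2000000 in
theorem CheckNeighbour_spec : Claim_equal_CheckNeighbour := by
  intro s _ _
  unfold Spec_CheckNeighbour
  have hrange : PySem.List.pyRange 0 9 1 = [0,1,2,3,4,5,6,7,8] := by decide
  have hA : CheckNeighbour s
      = List.foldl (pvOuterStep s) [0,0,0,0,0,0,0,0,0] [0,1,2,3,4,5,6,7,8] := by
    unfold CheckNeighbour; rw [hrange]
  obtain ⟨hAl, hAg⟩ := outer_fold_spec s [0,1,2,3,4,5,6,7,8] (by decide) [0,0,0,0,0,0,0,0,0] rfl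
  refine eq_of_nine _ _ (by rw [hA]; exact hAl) (B_len s) (fun n hn => ?_)
  rw [hA, hAg n hn]
  unfold CheckNeighbour_alt pyReverse
  rw [hrange]
  interval_cases n <;>
    simp [pyAdjacent, List.countP_cons, PySem.List.pyGetD_ofNat', List.getD] <;>
    split_ifs <;> push_cast <;> omega
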